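-- pv_equiv track=rewrite | github.com/pypi-data/pypi-code-58 | isc-py-common/isc-py-common-0.0.176.tar.gz/isc_common/__init__.py | del_last_not_digit
-- ===== SOURCE A (Python) =====
-- def del_last_not_digit(str):
--     res = ''
--     flag = False
--     for ch in reversed(str):
--         if flag or ch.isdigit():
--             res += ch
--             flag = True
--
--     return res[::-1]
-- ===== SOURCE B (Python) =====
-- def del_last_not_digit(str):
--     last = -1
--     for i, ch in enumerate(str):
--         if ch.isdigit():
--             last = i
--     return str[:last + 1]
-- ===== Notes on version B (the rewrite author's own statement) =====
-- stated objective: simpler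
-- what changed: Replaces A's reversed-iteration with a flag and character re-accumulation plus a final reverse by a single forward pass that only tracks the index of the last digit and returns one slice str[:last+1].
import Mathlib
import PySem

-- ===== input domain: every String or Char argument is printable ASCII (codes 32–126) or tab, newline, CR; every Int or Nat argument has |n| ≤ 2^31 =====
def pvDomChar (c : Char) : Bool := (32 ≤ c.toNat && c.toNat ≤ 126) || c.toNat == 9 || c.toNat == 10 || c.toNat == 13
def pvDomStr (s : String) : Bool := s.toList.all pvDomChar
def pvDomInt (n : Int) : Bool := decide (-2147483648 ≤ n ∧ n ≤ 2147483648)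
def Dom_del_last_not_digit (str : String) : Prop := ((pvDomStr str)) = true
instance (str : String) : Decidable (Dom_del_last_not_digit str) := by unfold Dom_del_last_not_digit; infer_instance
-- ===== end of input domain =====

-- B replaces A's reversed scan with flag + re-accumulated string by one forward pass
-- tracking the last digit index and a single slice; objective: simpler.


-- ===== PORT A =====
-- for ch in reversed(str): if flag or ch.isdigit(): res += ch; flag = True
def del_last_not_digit (str : String) : String :=
  let p := str.toList.reverse.foldl
    (fun (st : List Char × Bool) ch =>
      if st.2 || PySem.Chars.isdigit ch then (st.1 ++ [ch], true) else st)
    ([], false)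
  -- res[::-1]; slice? with step -1 always succeeds (step ≠ 0), getD is only totalisation
  String.ofList ((PySem.List.slice? p.1 none none (-1)).getD [])

-- ===== PORT B =====
-- last = -1; for i, ch in enumerate(str): if ch.isdigit(): last = i; return str[:last+1]
def del_last_not_digit_alt (str : String) : String :=
  let last := (PySem.List.enumerate str.toList 0).foldl
    (fun (last : Int) p => if PySem.Chars.isdigit p.2 then p.1 else last) (-1)
  PySem.Str.slice str none (some (last + 1))

-- ===== PRECONDITION & SPEC =====
def Spec_del_last_not_digit (str : String) (out : String) : Prop := out = del_last_not_digit_alt str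
instance (str : String) (out : String) : Decidable (Spec_del_last_not_digit str out) := by unfold Spec_del_last_not_digit; infer_instance

-- ===== CLAIM (what is proved, stated in full; the proofs are below) =====
def Claim_equal_del_last_not_digit : Prop := ∀ (str : String), Dom_del_last_not_digit str → Spec_del_last_not_digit str (del_last_not_digit str)

-- ===== LEMMAS AND PROOFS =====

def pvStepA : List Char × Bool → Char → List Char × Bool :=
  fun st ch => if st.2 || PySem.Chars.isdigit ch then (st.1 ++ [ch], true) else st

def pvLast (l : List Char) : Int :=
  (PySem.List.enumerate l 0).foldl
    (fun (last : Int) p => if PySem.Chars.isdigit p.2 then p.1 else last) (-1)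

theorem pvStepA_true (r : List Char) : ∀ res, r.foldl pvStepA (res, true) = (res ++ r, true) := by
  induction r with
  | nil => simp
  | cons c r ih => intro res; simp [pvStepA, List.foldl_cons, ih]

theorem pvFoldA_eq (r : List Char) :
    (r.foldl pvStepA ([], false)).1 = r.dropWhile (fun c => !PySem.Chars.isdigit c) := by
  induction r with
  | nil => simp
  | cons c r ih =>
    by_cases h : PySem.Chars.isdigit c = true
    · simp [pvStepA, List.foldl_cons, h, pvStepA_true, List.dropWhile]
    · simp only [Bool.not_eq_true] at h
      simp [pvStepA, List.foldl_cons, h, ih]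

theorem pvLast_concat (l : List Char) (c : Char) :
    pvLast (l ++ [c]) = if PySem.Chars.isdigit c then (l.length : Int) else pvLast l := by
  simp [pvLast, PySem.List.enumerate_append, PySem.List.enumerate_cons, PySem.List.enumerate_nil,
    List.foldl_append]

theorem pvLast_bounds (l : List Char) : -1 ≤ pvLast l ∧ pvLast l < l.length := by
  induction l using List.reverseRecOn with
  | nil => simp [pvLast, PySem.List.enumerate_nil]
  | append_singleton l c ih =>
    rw [pvLast_concat]
    rcases ih with ⟨h1, h2⟩
    split <;> simp <;> try omega

theorem pvTake_eq (l : List Char) :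
    l.take (pvLast l + 1).toNat = (l.reverse.dropWhile (fun c => !PySem.Chars.isdigit c)).reverse := by
  induction l using List.reverseRecOn with
  | nil => simp [pvLast, PySem.List.enumerate_nil]
  | append_singleton l c ih =>
    rw [pvLast_concat, List.reverse_append]
    by_cases h : PySem.Chars.isdigit c = true
    · simp only [h, if_pos trivial, List.reverse_singleton, List.singleton_append,
        List.dropWhile_cons, Bool.not_true, Bool.false_eq_true, if_false]
      have : ((l.length : Int) + 1).toNat = l.length + 1 := by omega
      simp [this, List.take_of_length_le]
    · simp only [h, Bool.false_eq_true, if_false, List.reverse_singleton, List.singleton_append]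
      obtain ⟨hb1, hb2⟩ := pvLast_bounds l
      have hle : (pvLast l + 1).toNat ≤ l.length := by omega
      rw [List.take_append_of_le_length hle, ih, List.dropWhile_cons]
      simp [h]

theorem pv_main (str : String) : del_last_not_digit str = del_last_not_digit_alt str := by
  unfold del_last_not_digit del_last_not_digit_alt
  show String.ofList ((PySem.List.slice? (str.toList.reverse.foldl pvStepA ([], false)).1 none none (-1)).getD [])
      = PySem.Str.slice str none (some (pvLast str.toList + 1))
  rw [PySem.List.slice?_none_none_neg_one, Option.getD_some, pvFoldA_eq]
  have hb := pvLast_bounds str.toList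
  have h2 : (PySem.Str.slice str none (some (pvLast str.toList + 1))).toList
      = str.toList.take (pvLast str.toList + 1).toNat := by
    obtain ⟨hb1, hb2⟩ := hb
    rw [PySem.Str.toList_slice, PySem.Chars.slice_eq_listSlice,
      PySem.List.slice_to _ (by omega)]
  apply String.toList_injective
  rw [h2, pvTake_eq, String.toList_ofList]

-- ===== VERDICT (by name: the statement is the Claim_ definition above) =====
theorem del_last_not_digit_spec : Claim_equal_del_last_not_digit := by
  intro str _
  exact pv_main str
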